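-- pv_equiv track=rewrite | github.com/ItzGlace/SSHBot | ssh-bot.py | clamp
-- ===== SOURCE A (Python) =====
-- from typing import Dict, Tuple, List, Optional
--
-- MAX_TG_CHARS = 3900
--
-- def clamp(text: str) -> str:
--     """Return the trailing part of `text` that fits within MAX_TG_CHARS."""
--     if len(text) <= MAX_TG_CHARS:
--         return text
--
--     lines = text.splitlines()
--     out_lines: List[str] = []
--     total = 0
--     # iterate from the end and accumulate
--     for line in reversed(lines):
--         l = len(line) + (1 if out_lines else 0)  # account for newline if not the last
--         if total + l > MAX_TG_CHARS:
--             break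
--         out_lines.append(line)
--         total += l
--
--     out_lines.reverse()
--     return "\n".join(out_lines)
-- ===== SOURCE B (Python) =====
-- MAX_TG_CHARS = 3900
--
-- def clamp(text: str) -> str:
--     """Return the trailing part of `text` that fits within MAX_TG_CHARS."""
--     if len(text) <= MAX_TG_CHARS:
--         return text
--     lines = text.splitlines()
--     while lines and len("\n".join(lines)) > MAX_TG_CHARS:
--         lines.pop(0)
--     return "\n".join(lines)
-- ===== Notes on version B (the rewrite author's own statement) =====
-- stated objective: simpler
-- what changed: Replaces the end-to-start accumulation with manual per-line newline bookkeeping by a drop-from-front loop that re-joins the remaining lines and pops the first line while the join is still too long.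
import Mathlib
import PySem

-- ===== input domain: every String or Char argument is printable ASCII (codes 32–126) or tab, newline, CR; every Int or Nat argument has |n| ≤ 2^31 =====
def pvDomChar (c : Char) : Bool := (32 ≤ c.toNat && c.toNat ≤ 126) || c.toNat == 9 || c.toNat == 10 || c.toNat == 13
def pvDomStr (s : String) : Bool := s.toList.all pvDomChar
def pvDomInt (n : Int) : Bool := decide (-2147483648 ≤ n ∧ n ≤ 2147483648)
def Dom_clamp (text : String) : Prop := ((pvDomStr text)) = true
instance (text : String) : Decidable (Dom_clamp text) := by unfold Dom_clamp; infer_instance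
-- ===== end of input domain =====

-- B replaces A's end-to-start accumulation with manual newline bookkeeping by a drop-from-front
-- loop that pops the first line while the re-joined remainder is still too long (simpler code).

-- ===== PORT A =====
-- for line in reversed(lines): accumulate into out_lines / total, break when the line would overflow
def clampLoopA : List String → List String → Int → List String
  | [], outLines, _ => outLines
  | line :: rest, outLines, total =>
    let l : Int := PySem.Str.len line + (if outLines ≠ [] then 1 else 0)
    if total + l > 3900 then outLines
    else clampLoopA rest (outLines ++ [line]) (total + l)

def clamp (text : String) : String :=
  if PySem.Str.len text ≤ 3900 then text
  else
    let lines := PySem.Str.splitlines text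
    let outLines := clampLoopA lines.reverse [] 0
    PySem.Str.join "\n" outLines.reverse

-- ===== PORT B =====
-- while lines and len("\n".join(lines)) > MAX_TG_CHARS: lines.pop(0)
def clampLoopB : List String → List String
  | [] => []
  | line :: rest =>
    if PySem.Str.len (PySem.Str.join "\n" (line :: rest)) > 3900 then clampLoopB rest
    else line :: rest

def clamp_alt (text : String) : String :=
  if PySem.Str.len text ≤ 3900 then text
  else PySem.Str.join "\n" (clampLoopB (PySem.Str.splitlines text))

-- ===== PRECONDITION & SPEC =====
def Spec_clamp (text : String) (out : String) : Prop := out = clamp_alt text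
instance (text : String) (out : String) : Decidable (Spec_clamp text out) := by unfold Spec_clamp; infer_instance

-- ===== CLAIM (what is proved, stated in full; the proofs are below) =====
def Claim_equal_clamp : Prop := ∀ (text : String), Dom_clamp text → Spec_clamp text (clamp text)

-- ===== LEMMAS AND PROOFS =====

def jlen : List String → Int
  | [] => 0
  | [l] => PySem.Str.len l
  | l :: rest => PySem.Str.len l + 1 + jlen rest

theorem jlen_join : ∀ xs : List String, PySem.Str.len (PySem.Str.join "\n" xs) = jlen xs
  | [] => by
      simp [jlen, PySem.Str.len_eq, PySem.Str.toList_join, PySem.Chars.join_nil]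
  | [x] => by
      simp [jlen, PySem.Str.len_eq, PySem.Str.toList_join, PySem.Chars.join_singleton]
  | x :: y :: r => by
      have ih := jlen_join (y :: r)
      simp only [PySem.Str.len_eq, PySem.Str.toList_join, List.map_cons] at ih ⊢
      rw [PySem.Chars.join_cons_cons]
      simp only [jlen, List.length_append]
      push_cast at ih ⊢
      simp only [PySem.Str.len_eq, List.length_cons, List.length_nil]
      omega

theorem jlen_nonneg : ∀ xs : List String, 0 ≤ jlen xs
  | [] => le_refl 0
  | [l] => by simp [jlen, PySem.Str.len_eq]
  | l :: y :: r => by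
      have ih := jlen_nonneg (y :: r)
      have h2 : (0:Int) ≤ PySem.Str.len l := by simp [PySem.Str.len_eq]
      simp only [jlen]; omega

theorem jlen_as_sum : ∀ xs : List String, xs ≠ [] →
    jlen xs = (xs.map PySem.Str.len).sum + xs.length - 1
  | [], h => absurd rfl h
  | [l], _ => by simp [jlen]
  | l :: y :: r, _ => by
      have ih := jlen_as_sum (y :: r) (by simp)
      simp only [jlen, List.map_cons, List.sum_cons, List.length_cons] at ih ⊢
      push_cast at ih ⊢
      omega

theorem jlen_reverse (xs : List String) : jlen xs.reverse = jlen xs := by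
  rcases xs with _ | ⟨a, rest⟩
  · rfl
  · rw [jlen_as_sum _ (by simp), jlen_as_sum _ (by simp)]
    simp [List.map_reverse]
    ring

def cfun (rev : List String) (ne : Bool) : Int :=
  if rev = [] then 0 else jlen rev + (if ne then 1 else 0)

theorem cfun_nonneg (rev : List String) (ne : Bool) : 0 ≤ cfun rev ne := by
  have := jlen_nonneg rev
  unfold cfun
  split_ifs <;> omega

theorem cfun_cons (line : String) (rest : List String) (ne : Bool) :
    cfun (line :: rest) ne
      = (PySem.Str.len line + (if ne then 1 else 0)) + cfun rest true := by
  rcases rest with _ | ⟨y, r⟩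
  · simp [cfun, jlen]
  · simp only [cfun, jlen, if_neg (by simp : ¬(line :: y :: r = [])),
      if_neg (by simp : ¬(y :: r = []))]
    split_ifs <;> omega

def aTake : List String → Int → Bool → List String
  | [], _, _ => []
  | line :: rest, total, ne =>
    let l : Int := PySem.Str.len line + (if ne then 1 else 0)
    if total + l > 3900 then [] else line :: aTake rest (total + l) true

theorem aTake_all : ∀ (rev : List String) (total : Int) (ne : Bool),
    total + cfun rev ne ≤ 3900 → aTake rev total ne = rev
  | [], _, _, _ => rfl
  | line :: rest, total, ne, h => by
      rw [cfun_cons] at h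
      have hc := cfun_nonneg rest true
      simp only [aTake]
      rw [if_neg (by omega), aTake_all rest _ true (by omega)]

theorem aTake_all_le : ∀ (rev : List String) (total : Int) (ne : Bool),
    total ≤ 3900 → aTake rev total ne = rev → total + cfun rev ne ≤ 3900
  | [], total, ne, ht, _ => by simpa [cfun] using ht
  | line :: rest, total, ne, ht, h => by
      rw [cfun_cons]
      simp only [aTake] at h
      by_cases hbr : total + (PySem.Str.len line + (if ne then 1 else 0)) > 3900
      · rw [if_pos hbr] at h
        exact absurd h (by simp)
      · rw [if_neg hbr] at h
        simp only [List.cons.injEq, true_and] at h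
        have := aTake_all_le rest _ true (by omega) h
        omega

theorem aTake_append : ∀ (xs ys : List String) (total : Int) (ne : Bool),
    aTake (xs ++ ys) total ne
      = if aTake xs total ne = xs
        then xs ++ aTake ys (total + cfun xs ne) (ne || !(xs.isEmpty))
        else aTake xs total ne
  | [], ys, total, ne => by simp [aTake, cfun]
  | line :: rest, ys, total, ne => by
      simp only [List.cons_append, aTake]
      by_cases hbr : total + (PySem.Str.len line + (if ne then 1 else 0)) > 3900
      · rw [if_pos hbr, if_pos hbr, if_neg (by simp)]
      · rw [if_neg hbr, if_neg hbr, aTake_append rest ys (total + (PySem.Str.len line + (if ne then 1 else 0))) true]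
        by_cases h2 : aTake rest (total + (PySem.Str.len line + (if ne then 1 else 0))) true = rest
        · rw [h2, if_pos rfl, if_pos rfl, cfun_cons]
          simp only [List.isEmpty_cons, Bool.not_false, Bool.or_true,
            List.cons.injEq, true_and]
          congr 2
          omega
        · rw [if_neg h2]
          have hne2 : ¬(line :: aTake rest (total + (PySem.Str.len line + (if ne then 1 else 0))) true
              = line :: rest) := by
            intro hh
            injection hh with _ h3
            exact h2 h3
          rw [if_neg hne2]

theorem clampLoopA_eq_aTake :
    ∀ (rev outLines : List String) (total : Int),
      clampLoopA rev outLines total = outLines ++ aTake rev total (!outLines.isEmpty)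
  | [], outLines, total => by simp [clampLoopA, aTake]
  | line :: rest, outLines, total => by
      simp only [clampLoopA, aTake]
      have hflag : (if outLines ≠ [] then (1:Int) else 0) = (if !outLines.isEmpty then 1 else 0) := by
        rcases outLines with _ | ⟨o, os⟩ <;> simp
      rw [hflag]
      by_cases hbr : total + (PySem.Str.len line + (if !outLines.isEmpty then 1 else 0)) > 3900
      · rw [if_pos hbr, if_pos hbr, List.append_nil]
      · rw [if_neg hbr, if_neg hbr,
          clampLoopA_eq_aTake rest (outLines ++ [line]) _]
        rw [show (!(outLines ++ [line]).isEmpty) = true by simp]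
        simp

theorem jlen_cons_ge (line : String) (rest : List String) : jlen rest ≤ jlen (line :: rest) := by
  have h0 : (0:Int) ≤ PySem.Str.len line := by simp [PySem.Str.len_eq]
  rcases rest with _ | ⟨y, r⟩
  · simp [jlen]
  · have := jlen_nonneg (y :: r)
    simp only [jlen]; omega

theorem cfun_reverse_false (rest : List String) :
    cfun rest.reverse false = jlen rest := by
  rcases rest with _ | ⟨y, r⟩
  · rfl
  · unfold cfun
    rw [if_neg (by simp), jlen_reverse]
    simp

theorem aTake_reverse_eq_loopB : ∀ L : List String,
    (aTake L.reverse 0 false).reverse = clampLoopB L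
  | [] => rfl
  | line :: rest => by
      have ih := aTake_reverse_eq_loopB rest
      rw [show (line :: rest).reverse = rest.reverse ++ [line] by simp,
        aTake_append]
      by_cases hall : aTake rest.reverse 0 false = rest.reverse
      · rw [if_pos hall]
        have hle : cfun rest.reverse false ≤ 3900 := by
          have := aTake_all_le rest.reverse 0 false (by omega) hall
          omega
        have hj : jlen rest ≤ 3900 := by rw [cfun_reverse_false] at hle; exact hle
        have hcost : (0 + cfun rest.reverse false)
            + (PySem.Str.len line + (if (false || !rest.reverse.isEmpty) then 1 else 0))
            = jlen (line :: rest) := by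
          rcases rest with _ | ⟨y, r⟩
          · simp [cfun, jlen]
          · rw [cfun_reverse_false]
            have hne : (false || !((y :: r).reverse.isEmpty)) = true := by simp
            rw [hne]
            simp only [jlen]
            norm_num
            ring
        simp only [aTake]
        by_cases hbig : (0 + cfun rest.reverse false)
            + (PySem.Str.len line + (if (false || !rest.reverse.isEmpty) then 1 else 0)) > 3900
        · rw [if_pos hbig, List.append_nil, List.reverse_reverse]
          unfold clampLoopB
          rw [jlen_join, if_pos (by omega)]
          rcases rest with _ | ⟨y, r⟩
          · rfl
          · unfold clampLoopB
            rw [jlen_join, if_neg (by omega)]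
        · rw [if_neg hbig]
          unfold clampLoopB
          rw [jlen_join, if_neg (by omega)]
          simp
      · rw [if_neg hall]
        have hrestne : rest ≠ [] := by
          rintro rfl; exact hall rfl
        have hjr : 3900 < jlen rest := by
          by_contra hle2
          exact hall (aTake_all rest.reverse 0 false (by rw [cfun_reverse_false]; omega))
        have hjl : 3900 < jlen (line :: rest) := lt_of_lt_of_le hjr (jlen_cons_ge line rest)
        rw [ih]
        unfold clampLoopB
        rw [jlen_join, if_pos (by omega)]
        rcases rest with _ | ⟨y, r⟩
        · exact absurd rfl hrestne
        · rfl

-- ===== VERDICT (by name: the statement is the Claim_ definition above) =====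
theorem clamp_spec : Claim_equal_clamp := by
  intro text _
  unfold Spec_clamp clamp clamp_alt
  split_ifs with h
  · rfl
  · show PySem.Str.join "\n" (clampLoopA (PySem.Str.splitlines text).reverse [] 0).reverse
      = PySem.Str.join "\n" (clampLoopB (PySem.Str.splitlines text))
    rw [clampLoopA_eq_aTake, List.nil_append,
      show (!(List.isEmpty ([] : List String))) = false from rfl,
      aTake_reverse_eq_loopB]
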